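-- pv_equiv track=rewrite | github.com/Angus1976/superinsight1225 | src/evaluation/assessment_reporter.py | _calculate_dimension_distribution
-- ===== SOURCE A (Python) =====
-- from typing import Dict, Any, List, Optional, Tuple
-- from enum import Enum
--
-- class AssessmentDimension(str, Enum):
--     """Assessment dimensions for multi-dimensional analysis."""
--     QUALITY = "quality"
--     EFFICIENCY = "efficiency"
--     COMPLIANCE = "compliance"
--     IMPROVEMENT = "improvement"
--     COLLABORATION = "collaboration"
--     INNOVATION = "innovation"
--
-- def _calculate_dimension_distribution(
--
--     assessments: List[Dict[str, Any]]
-- ) -> Dict[str, Dict[str, int]]: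
--     """Calculate distribution of scores across dimensions."""
--     distribution = {}
--
--     for dim in AssessmentDimension:
--         dim_scores = [a["dimension_scores"].get(dim.value, 0) for a in assessments]
--         distribution[dim.value] = {
--             "outstanding": sum(1 for s in dim_scores if s >= 90),
--             "excellent": sum(1 for s in dim_scores if 80 <= s < 90),
--             "good": sum(1 for s in dim_scores if 70 <= s < 80),
--             "average": sum(1 for s in dim_scores if 60 <= s < 70),
--             "poor": sum(1 for s in dim_scores if 50 <= s < 60),
--             "unacceptable": sum(1 for s in dim_scores if s < 50)
--         }
--
--     return distribution
-- ===== SOURCE B (Python) =====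
-- from typing import Dict, Any, List
-- from enum import Enum
--
-- class AssessmentDimension(str, Enum):
--     QUALITY = "quality"
--     EFFICIENCY = "efficiency"
--     COMPLIANCE = "compliance"
--     IMPROVEMENT = "improvement"
--     COLLABORATION = "collaboration"
--     INNOVATION = "innovation"
--
-- def _calculate_dimension_distribution(
--     assessments: List[Dict[str, Any]]
-- ) -> Dict[str, Dict[str, int]]:
--     """Single classifying pass per dimension instead of six filtering sums."""
--     distribution = {}
--     for dim in AssessmentDimension:
--         outstanding = excellent = good = average = poor = unacceptable = 0
--         for a in assessments:
--             s = a["dimension_scores"].get(dim.value, 0)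
--             if s >= 90:
--                 outstanding += 1
--             elif s >= 80:
--                 excellent += 1
--             elif s >= 70:
--                 good += 1
--             elif s >= 60:
--                 average += 1
--             elif s >= 50:
--                 poor += 1
--             else:
--                 unacceptable += 1
--         distribution[dim.value] = {
--             "outstanding": outstanding,
--             "excellent": excellent,
--             "good": good,
--             "average": average,
--             "poor": poor,
--             "unacceptable": unacceptable,
--         }
--     return distribution
-- ===== Notes on version B (the rewrite author's own statement) =====
-- stated objective: faster
-- what changed: Replaces the six filtering sum() generator passes (plus a materialized per-dimension score list) with one classifying pass per dimension that increments exactly one of six counters via an if/elif chain.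
import Mathlib
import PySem

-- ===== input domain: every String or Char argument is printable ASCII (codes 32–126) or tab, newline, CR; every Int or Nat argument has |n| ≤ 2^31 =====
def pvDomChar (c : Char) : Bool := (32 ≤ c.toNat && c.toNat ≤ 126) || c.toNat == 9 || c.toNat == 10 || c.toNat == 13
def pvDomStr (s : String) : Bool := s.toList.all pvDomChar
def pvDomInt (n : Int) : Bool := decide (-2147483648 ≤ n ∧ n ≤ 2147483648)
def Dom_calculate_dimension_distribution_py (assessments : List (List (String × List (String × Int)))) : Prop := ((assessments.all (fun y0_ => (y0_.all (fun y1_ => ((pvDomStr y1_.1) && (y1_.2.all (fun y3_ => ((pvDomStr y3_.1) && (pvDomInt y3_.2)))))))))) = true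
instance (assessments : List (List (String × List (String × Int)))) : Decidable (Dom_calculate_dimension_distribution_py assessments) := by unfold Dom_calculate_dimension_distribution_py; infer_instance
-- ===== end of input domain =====

-- B replaces A's six filtering sum() passes per dimension by one classifying pass with six
-- counters (same O(d*n) asymptotics, fewer traversals); equal output proved on Pre_.

-- the six AssessmentDimension values, in enum iteration order (shared constant of both sources)
def pvDims : List String := ["quality", "efficiency", "compliance", "improvement", "collaboration", "innovation"]

-- a["dimension_scores"].get(dim, 0) — identical line in both Pythons; the .getD [] default is
-- only reached outside Pre_ (Python raises KeyError there)
def pvScore (a : List (String × List (String × Int))) (dim : String) : Int :=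
  PySem.Dict.getD (PySem.Dict.mk (((PySem.Dict.mk a).get? "dimension_scores").getD [])) dim 0

-- ===== PORT A =====
-- distribution[dim.value] = … on a fresh distinct key appends to the dict, so the dict is the list built left to right
def calculate_dimension_distribution_py (assessments : List (List (String × List (String × Int)))) : List (String × List (String × Int)) :=
  pvDims.foldl (fun distribution dim =>
    let dim_scores := assessments.map (fun a => pvScore a dim)
    distribution ++ [(dim, [
      ("outstanding",  dim_scores.foldl (fun acc s => if 90 ≤ s then acc + 1 else acc) 0),
      ("excellent",    dim_scores.foldl (fun acc s => if 80 ≤ s ∧ s < 90 then acc + 1 else acc) 0),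
      ("good",         dim_scores.foldl (fun acc s => if 70 ≤ s ∧ s < 80 then acc + 1 else acc) 0),
      ("average",      dim_scores.foldl (fun acc s => if 60 ≤ s ∧ s < 70 then acc + 1 else acc) 0),
      ("poor",         dim_scores.foldl (fun acc s => if 50 ≤ s ∧ s < 60 then acc + 1 else acc) 0),
      ("unacceptable", dim_scores.foldl (fun acc s => if s < 50 then acc + 1 else acc) 0)])]) []

-- ===== PORT B =====
-- the loop body of Source B: the six counter variables are the components of one 6-tuple state,
-- and the if/elif chain increments exactly one of them
def pvStep (c : Int × Int × Int × Int × Int × Int) (s : Int) : Int × Int × Int × Int × Int × Int :=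
  match c with
  | (o, e, g, av, p, u) =>
    if 90 ≤ s then (o + 1, e, g, av, p, u)
    else if 80 ≤ s then (o, e + 1, g, av, p, u)
    else if 70 ≤ s then (o, e, g + 1, av, p, u)
    else if 60 ≤ s then (o, e, g, av + 1, p, u)
    else if 50 ≤ s then (o, e, g, av, p + 1, u)
    else (o, e, g, av, p, u + 1)

def calculate_dimension_distribution_py_alt (assessments : List (List (String × List (String × Int)))) : List (String × List (String × Int)) :=
  pvDims.foldl (fun distribution dim =>
    let c := assessments.foldl (fun c a => pvStep c (pvScore a dim)) (0, 0, 0, 0, 0, 0)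
    distribution ++ [(dim, [
      ("outstanding", c.1), ("excellent", c.2.1), ("good", c.2.2.1),
      ("average", c.2.2.2.1), ("poor", c.2.2.2.2.1), ("unacceptable", c.2.2.2.2.2)])]) []

-- ===== PRECONDITION & SPEC =====
-- Pre_: every assessment dict has the key "dimension_scores"; A raises KeyError otherwise.
def Pre_calculate_dimension_distribution_py (assessments : List (List (String × List (String × Int)))) : Prop :=
  ∀ a ∈ assessments, (PySem.Dict.mk a).contains "dimension_scores" = true
instance (assessments : List (List (String × List (String × Int)))) : Decidable (Pre_calculate_dimension_distribution_py assessments) := by unfold Pre_calculate_dimension_distribution_py; infer_instance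

def pvWitness_calculate_dimension_distribution_py : (List (List (String × List (String × Int)))) :=
  [[("dimension_scores", [("quality", 95), ("efficiency", 42)])], [("dimension_scores", [])]]

def Spec_calculate_dimension_distribution_py (assessments : List (List (String × List (String × Int)))) (out : List (String × List (String × Int))) : Prop := out = calculate_dimension_distribution_py_alt assessments
instance (assessments : List (List (String × List (String × Int)))) (out : List (String × List (String × Int))) : Decidable (Spec_calculate_dimension_distribution_py assessments out) := by unfold Spec_calculate_dimension_distribution_py; infer_instance

-- ===== CLAIM (what is proved, stated in full; the proofs are below) =====
def Claim_equal_calculate_dimension_distribution_py : Prop := ∀ (assessments : List (List (String × List (String × Int)))), Dom_calculate_dimension_distribution_py assessments → Pre_calculate_dimension_distribution_py assessments → Spec_calculate_dimension_distribution_py assessments (calculate_dimension_distribution_py assessments)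

-- ===== LEMMAS AND PROOFS =====

-- number of elements of l satisfying p, as an Int
def pvCnt (p : Int → Prop) [DecidablePred p] : List Int → Int
  | [] => 0
  | s :: t => (if p s then 1 else 0) + pvCnt p t

theorem pv_foldl_cnt (p : Int → Prop) [DecidablePred p] (l : List Int) (acc : Int) :
    l.foldl (fun a s => if p s then a + 1 else a) acc = acc + pvCnt p l := by
  induction l generalizing acc with
  | nil => simp [pvCnt]
  | cons s t ih => simp only [List.foldl_cons, pvCnt, ih]; split_ifs <;> ring

-- the classifying fold computes the six bucket counts
theorem pv_classify (l : List Int) (o e g av p u : Int) :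
    l.foldl pvStep (o, e, g, av, p, u) =
    (o + pvCnt (fun s => 90 ≤ s) l,
     e + pvCnt (fun s => 80 ≤ s ∧ s < 90) l,
     g + pvCnt (fun s => 70 ≤ s ∧ s < 80) l,
     av + pvCnt (fun s => 60 ≤ s ∧ s < 70) l,
     p + pvCnt (fun s => 50 ≤ s ∧ s < 60) l,
     u + pvCnt (fun s => s < 50) l) := by
  induction l generalizing o e g av p u with
  | nil => simp [pvCnt]
  | cons s t ih =>
    simp only [List.foldl_cons, pvCnt, pvStep]
    split_ifs <;>
      · rw [ih]
        refine Prod.ext ?_ (Prod.ext ?_ (Prod.ext ?_ (Prod.ext ?_ (Prod.ext ?_ ?_)))) <;> (dsimp only; omega)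

theorem pv_fold_eq (assessments : List (List (String × List (String × Int)))) (dim : String) :
    assessments.foldl (fun c a => pvStep c (pvScore a dim)) ((0 : Int), (0 : Int), (0 : Int), (0 : Int), (0 : Int), (0 : Int)) =
    (pvCnt (fun s => 90 ≤ s) (assessments.map (fun a => pvScore a dim)),
     pvCnt (fun s => 80 ≤ s ∧ s < 90) (assessments.map (fun a => pvScore a dim)),
     pvCnt (fun s => 70 ≤ s ∧ s < 80) (assessments.map (fun a => pvScore a dim)),
     pvCnt (fun s => 60 ≤ s ∧ s < 70) (assessments.map (fun a => pvScore a dim)),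
     pvCnt (fun s => 50 ≤ s ∧ s < 60) (assessments.map (fun a => pvScore a dim)),
     pvCnt (fun s => s < 50) (assessments.map (fun a => pvScore a dim))) := by
  rw [← List.foldl_map, pv_classify]
  simp

-- ===== VERDICT (by name: the statement is the Claim_ definition above) =====
theorem calculate_dimension_distribution_py_spec : Claim_equal_calculate_dimension_distribution_py := by
  intro assessments _hDom _hPre
  unfold Spec_calculate_dimension_distribution_py
  unfold calculate_dimension_distribution_py calculate_dimension_distribution_py_alt
  refine PySem.List.foldl_congr_mem _ _ _ _ ?_
  intro dist dim _
  simp only [pv_fold_eq, pv_foldl_cnt]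
  norm_num
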